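-- pv_equiv track=rewrite | github.com/JoaoRFigueiredo/LECI | Ano3/SIO/assignment-2---bingo-recurso-grupo38/extra/utils_sec.py | bingo_numbers
-- ===== SOURCE A (Python) =====
-- def bingo_numbers(card, final_deck):
--     # Create a set of the numbers on the player's card
--     card_set = set(card)
--
--     # Initialize a counter for the number of numbers called
--     count = 0
--
--     # Iterate over the called numbers
--     for number in final_deck:
--         # Increment the counter
--         count += 1
--
--         # If the number is on the player's card, remove it from the set
--         if number in card_set:
--             card_set.remove(number)
--
--         # If the set is empty, the player has won
--         if not card_set:
--             return count
--
--     # If the loop finishes without returning, the player did not win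
--     return -1
-- ===== SOURCE B (Python) =====
-- def bingo_numbers(card, final_deck):
--     # No draws means the game never ends, win or not.
--     if not final_deck:
--         return -1
--     # First-occurrence index of each drawn number (single pass).
--     first = {}
--     for i, v in enumerate(final_deck):
--         first.setdefault(v, i)
--     # The card is completed when its last-remaining number is first drawn.
--     best = 0
--     for v in set(card):
--         if v not in first:
--             return -1
--         best = max(best, first[v])
--     return best + 1
-- ===== Notes on version B (the rewrite author's own statement) =====
-- stated objective: idiomatic
-- what changed: Replaces A's draw-by-draw simulation that mutates a shrinking set of card numbers with a single enumerate pass building a first-occurrence-index dict, then returns 1 + max first index over the distinct card numbers (or -1 if some card number is never drawn or there are no draws).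
import Mathlib
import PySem

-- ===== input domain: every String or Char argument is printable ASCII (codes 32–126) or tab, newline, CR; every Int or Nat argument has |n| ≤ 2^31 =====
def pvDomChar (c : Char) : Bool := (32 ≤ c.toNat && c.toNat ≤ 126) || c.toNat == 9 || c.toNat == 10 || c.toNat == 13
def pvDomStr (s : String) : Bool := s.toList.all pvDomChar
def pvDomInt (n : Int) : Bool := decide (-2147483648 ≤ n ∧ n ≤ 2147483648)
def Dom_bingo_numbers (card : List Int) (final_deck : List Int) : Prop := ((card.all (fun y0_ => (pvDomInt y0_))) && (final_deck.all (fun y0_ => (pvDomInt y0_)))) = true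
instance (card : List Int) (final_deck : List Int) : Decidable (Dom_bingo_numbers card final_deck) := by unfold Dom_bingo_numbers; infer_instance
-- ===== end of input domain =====

-- B replaces A's draw-by-draw set simulation by one first-occurrence-index pass over the deck
-- plus a max over the card's distinct numbers (objective: idiomatic/alternative).

-- ===== PORT A =====
-- the 'for number in final_deck' loop: state = (card_set, count)
def bingoLoopA : PySem.Set Int → Int → List Int → Int
  | _, _, [] => -1
  | s, count, n :: rest =>
    let count' := count + 1
    -- 'if number in card_set: card_set.remove(number)' — remove under the membership guard = discard
    let s' := if PySem.Set.contains s n then PySem.Set.discard s n else s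
    if s'.isEmpty then count' else bingoLoopA s' count' rest

def bingo_numbers (card : List Int) (final_deck : List Int) : Int :=
  bingoLoopA (PySem.Set.ofList card) 0 final_deck

-- ===== PORT B =====
-- 'for i, v in enumerate(final_deck): first.setdefault(v, i)'
def firstDict (final_deck : List Int) : PySem.Dict Int Int :=
  (PySem.List.enumerate final_deck).foldl (fun d p => d.setdefault p.2 p.1) PySem.Dict.empty

-- 'for v in set(card): if v not in first: return -1; best = max(best, first[v])'
-- (membership test + lookup fused into one get?)
def bingoLoopB (first : PySem.Dict Int Int) : Int → List Int → Int
  | best, [] => best + 1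
  | best, v :: rest =>
    match first.get? v with
    | none => -1
    | some i => bingoLoopB first (max best i) rest

def bingo_numbers_alt (card : List Int) (final_deck : List Int) : Int :=
  if final_deck.isEmpty then -1
  else bingoLoopB (firstDict final_deck) 0 (PySem.Set.ofList card)

-- ===== PRECONDITION & SPEC =====
def Spec_bingo_numbers (card : List Int) (final_deck : List Int) (out : Int) : Prop := out = bingo_numbers_alt card final_deck
instance (card : List Int) (final_deck : List Int) (out : Int) : Decidable (Spec_bingo_numbers card final_deck out) := by unfold Spec_bingo_numbers; infer_instance

-- ===== CLAIM (what is proved, stated in full; the proofs are below) =====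
def Claim_equal_bingo_numbers : Prop := ∀ (card : List Int) (final_deck : List Int), Dom_bingo_numbers card final_deck → Spec_bingo_numbers card final_deck (bingo_numbers card final_deck)

-- ===== LEMMAS AND PROOFS =====

lemma foldl_max_nonneg (h : Int → Int) (_hh : ∀ v, 0 ≤ h v) :
    ∀ (l : List Int) (b : Int), 0 ≤ b → 0 ≤ l.foldl (fun a v => max a (h v)) b := by
  intro l
  induction l with
  | nil => intro b hb; simpa using hb
  | cons v t ih =>
    intro b hb
    simp only [List.foldl_cons]
    exact ih _ (le_max_of_le_left hb)

lemma foldl_max_base (h : Int → Int) (hh : ∀ v, 0 ≤ h v) :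
    ∀ (l : List Int) (b : Int), 0 ≤ b →
      l.foldl (fun a v => max a (h v)) b = max b (l.foldl (fun a v => max a (h v)) 0) := by
  intro l
  induction l with
  | nil => intro b hb; simp; omega
  | cons v t ih =>
    intro b hb
    simp only [List.foldl_cons]
    rw [ih (max b (h v)) (le_max_of_le_left hb), ih (max 0 (h v)) (le_max_of_le_left le_rfl)]
    have := hh v
    omega

lemma foldl_max_cons (h : Int → Int) (hh : ∀ v, 0 ≤ h v) (v : Int) (t : List Int) :
    (v :: t).foldl (fun a x => max a (h x)) 0 = max (h v) (t.foldl (fun a x => max a (h x)) 0) := by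
  simp only [List.foldl_cons]
  rw [foldl_max_base h hh t (max 0 (h v)) (le_max_left _ _)]
  have := hh v
  omega

lemma foldl_max_drop (h : Int → Int) (hh : ∀ v, 0 ≤ h v) (n : Int) :
    ∀ (l : List Int), (∀ v ∈ l, v = n → h v = 0) →
      l.foldl (fun a v => max a (h v)) 0
        = (PySem.Set.discard l n).foldl (fun a v => max a (h v)) 0 := by
  intro l
  induction l with
  | nil => intro _; rfl
  | cons v t ih =>
    intro hz
    have ht : ∀ x ∈ t, x = n → h x = 0 := fun x hx => hz x (List.mem_cons_of_mem _ hx)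
    by_cases hv : v = n
    · have h0 : h v = 0 := hz v (List.mem_cons_self) hv
      rw [foldl_max_cons h hh, h0, ih ht]
      have : PySem.Set.discard (v :: t) n = PySem.Set.discard t n := by
        simp [PySem.Set.discard, hv]
      rw [this]
      have := foldl_max_nonneg h hh (PySem.Set.discard t n) 0 le_rfl
      omega
    · have : PySem.Set.discard (v :: t) n = v :: PySem.Set.discard t n := by
        simp [PySem.Set.discard, hv]
      rw [this, foldl_max_cons h hh, foldl_max_cons h hh, ih ht]

lemma foldl_max_shift (f g : Int → Int) (hf : ∀ v, 0 ≤ f v) (hg : ∀ v, 0 ≤ g v) :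
    ∀ (l : List Int), l ≠ [] → (∀ v ∈ l, f v = g v + 1) →
      l.foldl (fun a v => max a (f v)) 0 = 1 + l.foldl (fun a v => max a (g v)) 0 := by
  intro l
  induction l with
  | nil => intro hne; exact absurd rfl hne
  | cons v t ih =>
    intro _ hfg
    have hfv : f v = g v + 1 := hfg v (List.mem_cons_self)
    rcases t with _ | ⟨w, t'⟩
    · simp [hfv]; have := hg v; omega
    · have hT : ∀ x ∈ (w :: t'), f x = g x + 1 := fun x hx => hfg x (List.mem_cons_of_mem _ hx)
      rw [foldl_max_cons f hf, foldl_max_cons g hg, ih (List.cons_ne_nil _ _) hT, hfv]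
      have := foldl_max_nonneg g hg (w :: t') 0 le_rfl
      omega

lemma setdefault_fold_get? (final_deck : List Int) : ∀ (s : Int) (d : PySem.Dict Int Int) (v : Int),
    ((PySem.List.enumerate final_deck s).foldl (fun d p => d.setdefault p.2 p.1) d).get? v
      = (d.get? v).or ((PySem.List.index? final_deck v).map (fun k => s + (k : Int))) := by
  induction final_deck with
  | nil =>
    intro s d v
    rw [PySem.List.enumerate_nil]
    simp only [List.foldl_nil, PySem.List.index?, List.idxOf?_nil]
    cases d.get? v <;> rfl
  | cons n rest ih =>
    intro s d v
    rw [PySem.List.enumerate_cons]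
    simp only [List.foldl_cons]
    rw [ih (s + 1) (d.setdefault n s) v]
    by_cases hv : v = n
    · subst hv
      by_cases hc : d.contains v = true
      · rw [PySem.Dict.setdefault_of_contains _ _ hc]
        have : (d.get? v).isSome := by rw [← PySem.Dict.contains_eq_isSome_get?]; exact hc
        obtain ⟨w, hw⟩ := Option.isSome_iff_exists.mp this
        simp [hw]
      · rw [PySem.Dict.setdefault_of_not_contains _ _ (by simpa using hc)]
        have hnone : d.get? v = none := by
          rw [PySem.Dict.get?_eq_none_iff_contains]; simpa using hc
        rw [PySem.Dict.get?_insert_self, hnone]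
        rw [PySem.List.index?_cons_self]
        simp
    · have hget : (d.setdefault n s).get? v = d.get? v := by
        by_cases hc : d.contains n = true
        · rw [PySem.Dict.setdefault_of_contains _ _ hc]
        · rw [PySem.Dict.setdefault_of_not_contains _ _ (by simpa using hc)]
          exact PySem.Dict.get?_insert_of_ne _ _ hv
      rw [hget]
      rw [PySem.List.index?_cons_of_ne _ (fun h => hv h.symm)]
      cases hdg : d.get? v <;> cases hidx : PySem.List.index? rest v <;>
        (simp [Option.or]; try omega)

lemma firstDict_get? (final_deck : List Int) (v : Int) :
    (firstDict final_deck).get? v = (PySem.List.index? final_deck v).map (fun k => (k : Int)) := by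
  rw [firstDict, setdefault_fold_get?]
  cases hidx : PySem.List.index? final_deck v <;> simp [PySem.Dict.get?_empty, Option.or]

lemma loopB_spec (final_deck : List Int) : ∀ (vs : List Int) (best : Int),
    bingoLoopB (firstDict final_deck) best vs
      = if ∀ v ∈ vs, v ∈ final_deck
        then (vs.foldl (fun b v => max b (((PySem.List.index? final_deck v).getD 0 : Nat) : Int)) best) + 1
        else -1 := by
  intro vs
  induction vs with
  | nil => intro best; simp [bingoLoopB]
  | cons v rest ih =>
    intro best
    rw [bingoLoopB]
    cases hidx : PySem.List.index? final_deck v with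
    | none =>
      have hv : v ∉ final_deck := (PySem.List.index?_eq_none_iff _ _).mp hidx
      have hg : (firstDict final_deck).get? v = none := by rw [firstDict_get?, hidx]; rfl
      simp only [hg]
      simp [hv]
    | some k =>
      have hv : v ∈ final_deck := (PySem.List.index?_isSome_iff final_deck v).mp (by rw [hidx]; rfl)
      have hg : (firstDict final_deck).get? v = some (k : Int) := by rw [firstDict_get?, hidx]; rfl
      simp only [hg]
      rw [ih (max best k)]
      by_cases hall : ∀ x ∈ rest, x ∈ final_deck
      · simp only [List.foldl_cons, hidx]
        have : (∀ x ∈ v :: rest, x ∈ final_deck) := by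
          intro x hx
          rcases List.mem_cons.mp hx with h | h
          · exact h ▸ hv
          · exact hall x h
        rw [if_pos this, if_pos hall]
        norm_num
      · have : ¬ (∀ x ∈ v :: rest, x ∈ final_deck) := by
          intro h; exact hall (fun x hx => h x (List.mem_cons_of_mem _ hx))
        rw [if_neg this, if_neg hall]

lemma discard_if (s : PySem.Set Int) (n : Int) :
    (if PySem.Set.contains s n then PySem.Set.discard s n else s) = PySem.Set.discard s n := by
  by_cases hc : PySem.Set.contains s n = true
  · rw [if_pos hc]
  · rw [if_neg hc]
    have hn : n ∉ s := by
      intro hmem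
      exact hc ((PySem.Set.contains_iff s n).mpr hmem)
    unfold PySem.Set.discard
    symm
    apply List.filter_eq_self.mpr
    intro a ha
    simp only [Bool.not_eq_true', beq_eq_false_iff_ne]
    intro h
    exact hn (h ▸ ha)

lemma loopA_spec : ∀ (final_deck : List Int) (s : PySem.Set Int) (count : Int),
    bingoLoopA s count final_deck
      = if final_deck.isEmpty then -1
        else if ∀ v ∈ s, v ∈ final_deck
        then count + 1 + s.foldl (fun b v => max b (((PySem.List.index? final_deck v).getD 0 : Nat) : Int)) 0
        else -1 := by
  intro final_deck
  induction final_deck with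
  | nil => intro s count; rfl
  | cons n rest ih =>
    intro s count
    rw [bingoLoopA]
    simp only [discard_if]
    have hh : ∀ v : Int, (0:Int) ≤ (((PySem.List.index? (n :: rest) v).getD 0 : Nat) : Int) := by
      intro v; exact Int.natCast_nonneg _
    have hg : ∀ v : Int, (0:Int) ≤ (((PySem.List.index? rest v).getD 0 : Nat) : Int) := by
      intro v; exact Int.natCast_nonneg _
    have hz : ∀ v ∈ s, v = n → (((PySem.List.index? (n :: rest) v).getD 0 : Nat) : Int) = 0 := by
      intro v _ hv
      subst hv
      rw [PySem.List.index?_cons_self]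
      rfl
    by_cases hE : (PySem.Set.discard s n).isEmpty
    · rw [if_pos hE]
      have hD : PySem.Set.discard s n = [] := List.isEmpty_iff.mp hE
      have hall : ∀ v ∈ s, v ∈ n :: rest := by
        intro v hv
        by_cases hvn : v = n
        · exact hvn ▸ List.mem_cons_self
        · exact absurd (hD ▸ (PySem.Set.mem_discard ..).mpr ⟨hv, hvn⟩) (List.not_mem_nil)
      rw [List.isEmpty_cons, if_neg (by simp), if_pos hall]
      rw [foldl_max_drop _ hh n s hz, hD]
      simp
    · rw [if_neg hE]
      have hD : PySem.Set.discard s n ≠ [] := by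
        intro h; rw [h] at hE; exact hE rfl
      rw [ih (PySem.Set.discard s n) (count + 1)]
      by_cases hc : ∀ v ∈ PySem.Set.discard s n, v ∈ rest
      · -- rest nonempty since the nonempty remainder lies in it
        obtain ⟨w, hw⟩ := List.exists_mem_of_ne_nil _ hD
        have hrest : rest.isEmpty = false := by
          cases rest with
          | nil => exact absurd (hc w hw) (List.not_mem_nil)
          | cons _ _ => rfl
        rw [hrest, if_neg (by simp), if_pos hc]
        have hall : ∀ v ∈ s, v ∈ n :: rest := by
          intro v hv
          by_cases hvn : v = n
          · exact hvn ▸ List.mem_cons_self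
          · exact List.mem_cons_of_mem _ (hc v ((PySem.Set.mem_discard ..).mpr ⟨hv, hvn⟩))
        rw [List.isEmpty_cons, if_neg (by simp), if_pos hall]
        rw [foldl_max_drop _ hh n s hz]
        rw [foldl_max_shift _ _ hh hg (PySem.Set.discard s n) hD]
        · omega
        · intro v hv
          have hvn : v ≠ n := ((PySem.Set.mem_discard ..).mp hv).2
          obtain ⟨k, hk⟩ := Option.isSome_iff_exists.mp ((PySem.List.index?_isSome_iff rest v).mpr (hc v hv))
          rw [PySem.List.index?_cons_of_ne _ (fun h => hvn h.symm), hk]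
          rfl
      · have hnall : ¬ ∀ v ∈ s, v ∈ n :: rest := by
          intro hall
          apply hc
          intro v hv
          obtain ⟨hvs, hvn⟩ := (PySem.Set.mem_discard ..).mp hv
          rcases List.mem_cons.mp (hall v hvs) with h | h
          · exact absurd h hvn
          · exact h
        simp only [List.isEmpty_cons, Bool.false_eq_true, if_false]
        rw [if_neg hnall]
        split <;> rfl

-- ===== VERDICT (by name: the statement is the Claim_ definition above) =====
theorem bingo_numbers_spec : Claim_equal_bingo_numbers := by
  intro card final_deck _
  unfold Spec_bingo_numbers bingo_numbers bingo_numbers_alt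
  rw [loopA_spec]
  cases hd : final_deck.isEmpty with
  | true => rw [if_pos rfl, if_pos rfl]
  | false =>
    simp only [Bool.false_eq_true, if_false]
    rw [loopB_spec]
    by_cases hall : ∀ v ∈ PySem.Set.ofList card, v ∈ final_deck
    · rw [if_pos hall, if_pos hall]; omega
    · rw [if_neg hall, if_neg hall]
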